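-- pv_equiv track=rewrite | github.com/AndyWorkSpace/programming-languages | python/abstraccion/Recursividad/Numero apocaliptico.py | NA
-- ===== SOURCE A (Python) =====
-- def NA(n):
-- 	if n<100:
-- 		return False
-- 	else:
-- 		if n%1000==666:
-- 			return True
-- 		else:
-- 			return NA(n//10)
-- ===== SOURCE B (Python) =====
-- def NA(n):
--     return n >= 0 and '666' in str(n)
-- ===== Notes on version B (the rewrite author's own statement) =====
-- stated objective: idiomatic
-- what changed: Replaced the recursion on n//10 testing n%1000==666 at each level by a single substring test '666' in str(n), guarded by n >= 0 (A returns False for every negative n).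
import Mathlib
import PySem

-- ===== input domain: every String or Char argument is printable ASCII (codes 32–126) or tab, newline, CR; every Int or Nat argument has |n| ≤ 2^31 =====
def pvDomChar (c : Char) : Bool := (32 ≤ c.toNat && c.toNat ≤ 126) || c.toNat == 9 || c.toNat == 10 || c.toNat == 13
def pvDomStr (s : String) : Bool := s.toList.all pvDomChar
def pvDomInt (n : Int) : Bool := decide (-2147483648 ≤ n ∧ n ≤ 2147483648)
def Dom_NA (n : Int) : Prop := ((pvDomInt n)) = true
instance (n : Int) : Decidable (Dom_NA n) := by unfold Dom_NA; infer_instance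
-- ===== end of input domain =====

-- B replaces A's recursion on n//10 (testing n%1000==666 at each level) by the
-- idiomatic single substring test: n >= 0 and '666' in str(n).

-- ===== PORT A =====
def NA (n : Int) : Bool :=
  if n < 100 then false
  else if PySem.Int.mod n 1000 == 666 then true
  else NA (PySem.Int.floordiv n 10)
termination_by n.toNat
decreasing_by
  rw [PySem.Int.floordiv_eq_ediv_of_pos (by omega : (0:Int) < 10)]
  omega

-- ===== PORT B =====
def NA_alt (n : Int) : Bool :=
  decide (0 ≤ n) && PySem.Str.isIn "666" (PySem.Int.toStr n)

-- ===== PRECONDITION & SPEC =====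
def Spec_NA (n : Int) (out : Bool) : Prop := out = NA_alt n
instance (n : Int) (out : Bool) : Decidable (Spec_NA n out) := by unfold Spec_NA; infer_instance

-- ===== CLAIM (what is proved, stated in full; the proofs are below) =====
def Claim_equal_NA : Prop := ∀ (n : Int), Dom_NA n → Spec_NA n (NA n)

-- ===== LEMMAS AND PROOFS =====


-- toDigitsCore: the accumulator is appended on the right
lemma tdc_acc (b : Nat) : ∀ (f n : Nat) (l : List Char),
    Nat.toDigitsCore b f n l = Nat.toDigitsCore b f n [] ++ l := by
  intro f
  induction f with
  | zero => intro n l; simp [Nat.toDigitsCore]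
  | succ f ih =>
    intro n l
    simp only [Nat.toDigitsCore]
    by_cases h : n / b = 0
    · simp [h]
    · simp only [h, if_false]
      rw [ih (n / b) (Nat.digitChar (n % b) :: l), ih (n / b) [Nat.digitChar (n % b)]]
      simp

-- toDigitsCore: any sufficient fuel gives the same result (base 10)
lemma tdc_fuel : ∀ (n f f' : Nat), n < f → n < f' → ∀ (l : List Char),
    Nat.toDigitsCore 10 f n l = Nat.toDigitsCore 10 f' n l := by
  intro n
  induction n using Nat.strong_induction_on with
  | _ n ih =>
    intro f f' hf hf' l
    obtain ⟨f, rfl⟩ : ∃ g, f = g + 1 := ⟨f - 1, by omega⟩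
    obtain ⟨f', rfl⟩ : ∃ g, f' = g + 1 := ⟨f' - 1, by omega⟩
    simp only [Nat.toDigitsCore]
    by_cases h : n / 10 = 0
    · simp [h]
    · simp only [h, if_false]
      have hn : 10 ≤ n := by
        by_contra hc
        exact h (Nat.div_eq_of_lt (by omega))
      exact ih (n / 10) (by omega) f f' (by omega) (by omega) _


lemma tdc_succ (f n : Nat) (l : List Char) : Nat.toDigitsCore 10 (f+1) n l =
    if n / 10 = 0 then Nat.digitChar (n % 10) :: l
    else Nat.toDigitsCore 10 f (n / 10) (Nat.digitChar (n % 10) :: l) := rfl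

lemma toDigits_step (m : Nat) (h : 10 ≤ m) :
    Nat.toDigits 10 m = Nat.toDigits 10 (m / 10) ++ [Nat.digitChar (m % 10)] := by
  rw [Nat.toDigits, Nat.toDigits, tdc_succ]
  have h10 : ¬ m / 10 = 0 := by omega
  rw [if_neg h10, tdc_acc, tdc_fuel (m / 10) m (m / 10 + 1) (by omega) (by omega)]

lemma toDigits_small (m : Nat) (h : m < 10) :
    Nat.toDigits 10 m = [Nat.digitChar m] := by
  rw [Nat.toDigits, tdc_succ, if_pos (by omega), Nat.mod_eq_of_lt h]

lemma digitChar_eq_six {d : Nat} (h : d < 10) : Nat.digitChar d = '6' ↔ d = 6 := by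
  interval_cases d <;> simp_all <;> decide

-- for m ≥ 100 the decimal string ends with the three low digits
lemma last3 (m : Nat) (h : 100 ≤ m) : ∃ p, Nat.toDigits 10 m =
    p ++ [Nat.digitChar (m / 100 % 10), Nat.digitChar (m / 10 % 10), Nat.digitChar (m % 10)] := by
  rw [toDigits_step m (by omega), toDigits_step (m / 10) (by omega)]
  have h2 : m / 10 / 10 = m / 100 := by omega
  rw [h2]
  by_cases hc : m / 100 < 10
  · refine ⟨[], ?_⟩
    rw [toDigits_small _ hc, Nat.mod_eq_of_lt hc]; simp
  · refine ⟨Nat.toDigits 10 (m / 100 / 10), ?_⟩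
    rw [toDigits_step _ (by omega)]; simp

lemma suffix_666_iff (m : Nat) (h : 100 ≤ m) :
    (['6','6','6'] <:+ Nat.toDigits 10 m) ↔ m % 1000 = 666 := by
  obtain ⟨p, hp⟩ := last3 m h
  rw [hp]
  constructor
  · rintro ⟨q, hq⟩
    have h3 := (List.append_inj' hq (by simp)).2
    simp only [List.cons.injEq, and_true] at h3
    obtain ⟨h6a, h6b, h6c⟩ := h3
    rw [eq_comm, digitChar_eq_six (Nat.mod_lt _ (by omega))] at h6a h6b h6c
    omega
  · intro hm
    have ha : Nat.digitChar (m / 100 % 10) = '6' :=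
      (digitChar_eq_six (Nat.mod_lt _ (by omega))).2 (by omega)
    have hb : Nat.digitChar (m / 10 % 10) = '6' :=
      (digitChar_eq_six (Nat.mod_lt _ (by omega))).2 (by omega)
    have hc : Nat.digitChar (m % 10) = '6' :=
      (digitChar_eq_six (Nat.mod_lt _ (by omega))).2 (by omega)
    rw [ha, hb, hc]
    exact ⟨p, rfl⟩

lemma infix_concat_iff (a s : List Char) (c : Char) :
    a <:+: s ++ [c] ↔ a <:+: s ∨ a <:+ s ++ [c] := by
  constructor
  · rintro ⟨p, t, hpt⟩
    rcases t.eq_nil_or_concat with rfl | ⟨t', c', rfl⟩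
    · right; exact ⟨p, by simpa using hpt⟩
    · left
      rw [List.concat_eq_append, show p ++ a ++ (t' ++ [c']) = (p ++ a ++ t') ++ [c'] by
        simp] at hpt
      exact ⟨p, t', (List.append_inj' hpt (by simp)).1⟩
  · rintro (hi | hs)
    · exact hi.trans (List.prefix_append s [c]).isInfix
    · exact hs.isInfix

lemma NA_char (m : Nat) : NA (m : Int) = true ↔ ['6','6','6'] <:+: Nat.toDigits 10 m := by
  induction m using Nat.strong_induction_on with
  | _ m ih =>
    by_cases h : m < 100
    · rw [NA, if_pos (by exact_mod_cast h)]
      simp only [Bool.false_eq_true, false_iff]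
      intro hinf
      have h3 := hinf.length_le
      have h2 := Nat.toDigits_length 10 m 2 (by omega) (by norm_num; omega)
      simp at h3
      omega
    · rw [NA, if_neg (by exact_mod_cast h)]
      have hmod : PySem.Int.mod (m : Int) 1000 = ((m % 1000 : Nat) : Int) := by
        exact_mod_cast PySem.Int.mod_natCast m 1000
      have hdiv : PySem.Int.floordiv (m : Int) 10 = ((m / 10 : Nat) : Int) := by
        exact_mod_cast PySem.Int.floordiv_natCast m 10
      rw [hmod, hdiv]
      have hstep := toDigits_step m (by omega)
      have hsuf : (['6','6','6'] <:+ Nat.toDigits 10 (m / 10) ++ [Nat.digitChar (m % 10)]) ↔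
          m % 1000 = 666 := by rw [← hstep]; exact suffix_666_iff m (by omega)
      by_cases hm : m % 1000 = 666
      · rw [if_pos (by simp; exact_mod_cast hm)]
        simp only [true_iff]
        rw [hstep]
        exact (hsuf.2 hm).isInfix
      · rw [if_neg (by simp; exact_mod_cast hm)]
        rw [ih (m / 10) (by omega), hstep, infix_concat_iff, hsuf]
        simp [hm]

lemma NA_alt_char (m : Nat) :
    NA_alt (m : Int) = true ↔ ['6','6','6'] <:+: Nat.toDigits 10 m := by
  have h1 : ("666" : String).toList = ['6','6','6'] := rfl
  have h2 : (PySem.Int.toStr (m : Int)).toList = Nat.toDigits 10 m := by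
    rw [PySem.Int.toList_toStr]
    simp [PySem.Int.toChars]
  rw [NA_alt]
  simp only [Int.natCast_nonneg, decide_true, Bool.true_and]
  rw [PySem.Str.isIn_iff_infix, h1, h2]

-- ===== VERDICT (by name: the statement is the Claim_ definition above) =====
theorem NA_spec : Claim_equal_NA := by
  unfold Claim_equal_NA
  intro n _
  unfold Spec_NA
  by_cases hn : 0 ≤ n
  · obtain ⟨m, rfl⟩ := Int.eq_ofNat_of_zero_le hn
    rw [Bool.eq_iff_iff, NA_char m, NA_alt_char m]
  · rw [NA, if_pos (by omega)]
    unfold NA_alt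
    simp [hn]
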